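-- pv_equiv track=rewrite | github.com/rp2knight/rp2knight.github.io | riddlers/code/cubedivision.py | f
-- ===== SOURCE A (Python) =====
-- def f(a, n):
--     results = []
--     if (a == 0):
--         return(results)
--     if (n == (a**3)):
--         results.append([a])
--     if (n > (a**3)):
--         for l in f(a-1, n-(a**3)):
--             c = l.copy()
--             c.append(a)
--             results.append(c)
--     for l in f(a-1, n):
--         c = l.copy()
--         results.append(c)
--     return(results)
-- ===== SOURCE B (Python) =====
-- def f(a, n):
--     # Top-down dynamic programming: same search as the naive recursion, but each
--     # distinct (a, n) state is solved once (memo dict) and a state whose target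
--     # exceeds 1^3+...+a^3 = (a*(a+1)//2)**2 is closed immediately as hopeless.
--     memo = {}
--
--     def go(a, n):
--         if a == 0:
--             return []
--         if n > (a * (a + 1) // 2) ** 2:
--             return []
--         key = (a, n)
--         if key in memo:
--             return memo[key]
--         c = a ** 3
--         res = []
--         if n == c:
--             res.append([a])
--         if n > c:
--             res += [l + [a] for l in go(a - 1, n - c)]
--         res += go(a - 1, n)
--         memo[key] = res
--         return res
--
--     return go(a, n)
-- ===== Notes on version B (the rewrite author's own statement) =====
-- stated objective: faster
-- what changed: Replaces the naive exponential recursion by top-down dynamic programming: a memo dict keyed by (a, n) solves each state once, and any state whose target n exceeds 1^3+...+a^3 = (a*(a+1)//2)**2 is closed immediately as unreachable.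
import Mathlib
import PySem

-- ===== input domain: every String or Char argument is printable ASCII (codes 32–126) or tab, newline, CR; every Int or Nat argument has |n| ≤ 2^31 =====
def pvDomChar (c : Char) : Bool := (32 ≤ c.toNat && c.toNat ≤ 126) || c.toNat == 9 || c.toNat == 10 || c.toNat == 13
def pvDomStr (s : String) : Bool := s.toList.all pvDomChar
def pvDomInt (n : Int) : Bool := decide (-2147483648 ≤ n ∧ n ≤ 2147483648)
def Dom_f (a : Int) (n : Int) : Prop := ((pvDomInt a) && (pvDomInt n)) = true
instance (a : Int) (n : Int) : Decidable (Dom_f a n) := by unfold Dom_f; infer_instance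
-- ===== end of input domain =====

-- B replaces A's naive exponential recursion by memoized (dict-keyed) top-down DP with an
-- infeasibility cut-off (n > 1^3+...+a^3); return values are proved identical on Pre_f.

-- ===== PORT A =====
-- Python A recurses on a-1; it returns only for a ≥ 0 (a < 0 ⇒ RecursionError), so the
-- port recurses on a.toNat, which mirrors A's 'a == 0' base case exactly when 0 ≤ a.
def fGo : Nat → Int → List (List Int)
  | 0, _ => []
  | k + 1, n =>
    -- results.append([a]) when n == a**3   (here a = k+1 as an Int)
    let results : List (List Int) := if n = ((k : Int) + 1) ^ 3 then [[(k : Int) + 1]] else []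
    -- for l in f(a-1, n-a**3): c = l.copy(); c.append(a); results.append(c)
    let results := if n > ((k : Int) + 1) ^ 3 then
        results ++ (fGo k (n - ((k : Int) + 1) ^ 3)).map (fun l => l ++ [(k : Int) + 1])
      else results
    -- for l in f(a-1, n): c = l.copy(); results.append(c)   (list.copy() is the identity on values)
    results ++ (fGo k n).map (fun l => l)

def f (a : Int) (n : Int) : List (List Int) := fGo a.toNat n

-- ===== PORT B =====
-- The memo dict is threaded explicitly; keys are the Python tuples (a, n).
def goB : Nat → Int → PySem.Dict (Int × Int) (List (List Int)) →
    (List (List Int)) × PySem.Dict (Int × Int) (List (List Int))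
  | 0, _, memo => ([], memo)
  | k + 1, n, memo =>
    -- if n > (a*(a+1)//2)**2: return []
    if n > (PySem.Int.floordiv (((k : Int) + 1) * (((k : Int) + 1) + 1)) 2) ^ 2 then ([], memo)
    else
      match memo.get? (((k : Int) + 1), n) with
      | some r => (r, memo)
      | none =>
        -- res = [[a]] if n == a**3 else [];  res += [l + [a] for l in go(a-1, n-a**3)] if n > a**3
        let p1 := if n > ((k : Int) + 1) ^ 3 then
            let q := goB k (n - ((k : Int) + 1) ^ 3) memo
            ((if n = ((k : Int) + 1) ^ 3 then [[(k : Int) + 1]] else []) ++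
              q.1.map (fun l => l ++ [(k : Int) + 1]), q.2)
          else ((if n = ((k : Int) + 1) ^ 3 then [[(k : Int) + 1]] else []), memo)
        -- res += go(a-1, n);  memo[(a, n)] = res
        let p2 := goB k n p1.2
        (p1.1 ++ p2.1, p2.2.insert (((k : Int) + 1), n) (p1.1 ++ p2.1))

def f_alt (a : Int) (n : Int) : List (List Int) := (goB a.toNat n PySem.Dict.empty).1

-- ===== PRECONDITION & SPEC =====
-- Pre_f excludes a < 0, where Python A recurses forever (RecursionError) and returns nothing.
def Pre_f (a : Int) (n : Int) : Prop := 0 ≤ a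
instance (a : Int) (n : Int) : Decidable (Pre_f a n) := by unfold Pre_f; infer_instance
def pvWitness_f : Int × Int := (5, 36)

def Spec_f (a : Int) (n : Int) (out : List (List Int)) : Prop := out = f_alt a n
instance (a : Int) (n : Int) (out : List (List Int)) : Decidable (Spec_f a n out) := by unfold Spec_f; infer_instance

-- ===== CLAIM (what is proved, stated in full; the proofs are below) =====
def Claim_equal_f : Prop := ∀ (a : Int) (n : Int), Dom_f a n → Pre_f a n → Spec_f a n (f a n)

-- ===== LEMMAS AND PROOFS =====

-- S k = 1^3 + ... + k^3
def S : Nat → Int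
  | 0 => 0
  | k + 1 => S k + ((k : Int) + 1) ^ 3

lemma S_nonneg (k : Nat) : 0 ≤ S k := by
  induction k with
  | zero => simp [S]
  | succ k ih => simp only [S]; positivity

-- B's cut-off bound (a*(a+1)//2)**2 for a = k+1 is exactly S (k+1)
lemma triSq_eq_S (k : Nat) :
    (PySem.Int.floordiv (((k : Int) + 1) * (((k : Int) + 1) + 1)) 2) ^ 2 = S (k + 1) := by
  induction k with
  | zero => decide
  | succ k ih =>
    rw [PySem.Int.floordiv_eq_ediv_of_pos (by norm_num)] at ih ⊢
    obtain ⟨d, hd⟩ := Int.even_mul_succ_self ((k : Int) + 1)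
    obtain ⟨e, he⟩ := Int.even_mul_succ_self ((k : Int) + 2)
    have hd' : ((k : Int) + 1) * (((k : Int) + 1) + 1) = 2 * d := by linarith [hd]
    have he' : (((k + 1 : Nat) : Int) + 1) * ((((k + 1 : Nat) : Int) + 1) + 1) = 2 * e := by
      push_cast; linarith [he]
    rw [he', Int.mul_ediv_cancel_left e (by norm_num)]
    rw [hd', Int.mul_ediv_cancel_left d (by norm_num)] at ih
    have hde : e = d + ((k : Int) + 2) := by
      have hx : (((k : Int) + 2)) * (((k : Int) + 2) + 1)
          - (((k : Int) + 1)) * (((k : Int) + 1) + 1) = 2 * ((k : Int) + 2) := by ring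
      have he'' : (((k : Int) + 2)) * (((k : Int) + 2) + 1) = 2 * e := by
        push_cast at he'; linarith [he']
      linarith [hd', he'', hx]
    rw [hde]
    simp only [S] at ih ⊢
    rw [← ih]
    push_cast
    linear_combination (-((k : Int) + 2)) * hd'

-- A returns no subsets when the target exceeds the total 1^3+...+a^3
lemma fGo_nil (k : Nat) : ∀ n : Int, S k < n → fGo k n = [] := by
  induction k with
  | zero => intro n _; rfl
  | succ k ih =>
    intro n hn
    simp only [S] at hn
    have hSk := S_nonneg k
    have hc : (0 : Int) < ((k : Int) + 1) ^ 3 := by positivity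
    have hne : ¬ n = ((k : Int) + 1) ^ 3 := by omega
    have hngt : n > ((k : Int) + 1) ^ 3 := by omega
    have h1 : fGo k (n - ((k : Int) + 1) ^ 3) = [] := ih _ (by omega)
    have h2 : fGo k n = [] := ih _ (by omega)
    simp [fGo, hne, hngt, h1, h2]

-- the memo only ever holds correct values
def MemoOK (memo : PySem.Dict (Int × Int) (List (List Int))) : Prop :=
  ∀ (p : Int × Int) (r : List (List Int)), memo.get? p = some r →
    0 ≤ p.1 ∧ r = fGo p.1.toNat p.2

lemma memoOK_empty : MemoOK PySem.Dict.empty := by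
  intro p r h
  simp [PySem.Dict.get?_empty] at h

-- main invariant: goB computes fGo and preserves MemoOK
lemma goB_correct (k : Nat) : ∀ (n : Int) (memo : PySem.Dict (Int × Int) (List (List Int))),
    MemoOK memo → (goB k n memo).1 = fGo k n ∧ MemoOK (goB k n memo).2 := by
  induction k with
  | zero => intro n memo h; exact ⟨rfl, h⟩
  | succ k ih =>
    intro n memo hmem
    by_cases hbig : n > (PySem.Int.floordiv (((k : Int) + 1) * (((k : Int) + 1) + 1)) 2) ^ 2
    · have hnil : fGo (k + 1) n = [] := by
        apply fGo_nil (k + 1) n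
        rw [triSq_eq_S] at hbig
        omega
      refine ⟨?_, ?_⟩
      · simp only [goB, if_pos hbig, hnil]
      · simp only [goB, if_pos hbig]; exact hmem
    · rcases hget : memo.get? (((k : Int) + 1), n) with _ | r
      · -- miss: compute and insert
        have hfgo : fGo (k + 1) n =
            ((if n = ((k : Int) + 1) ^ 3 then [[(k : Int) + 1]] else []) ++
              (if n > ((k : Int) + 1) ^ 3 then
                (fGo k (n - ((k : Int) + 1) ^ 3)).map (fun l => l ++ [(k : Int) + 1]) else [])) ++
            (fGo k n).map (fun l => l) := by
          by_cases hgt : n > ((k : Int) + 1) ^ 3 <;> simp [fGo, hgt]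
        set P1 := (if n > ((k : Int) + 1) ^ 3 then
            let q := goB k (n - ((k : Int) + 1) ^ 3) memo
            ((if n = ((k : Int) + 1) ^ 3 then [[(k : Int) + 1]] else []) ++
              q.1.map (fun l => l ++ [(k : Int) + 1]), q.2)
          else ((if n = ((k : Int) + 1) ^ 3 then [[(k : Int) + 1]] else []), memo)) with hP1
        have hP1v : P1.1 = (if n = ((k : Int) + 1) ^ 3 then [[(k : Int) + 1]] else []) ++
            (if n > ((k : Int) + 1) ^ 3 then
              (fGo k (n - ((k : Int) + 1) ^ 3)).map (fun l => l ++ [(k : Int) + 1]) else []) := by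
          rw [hP1]
          by_cases hgt : n > ((k : Int) + 1) ^ 3
          · simp only [if_pos hgt, (ih _ memo hmem).1]
          · simp only [if_neg hgt, List.append_nil]
        have hP1m : MemoOK P1.2 := by
          rw [hP1]
          by_cases hgt : n > ((k : Int) + 1) ^ 3
          · simp only [if_pos hgt]; exact (ih _ memo hmem).2
          · simp only [if_neg hgt]; exact hmem
        have h2 := ih n P1.2 hP1m
        have hval : (goB (k + 1) n memo).1 = P1.1 ++ (goB k n P1.2).1 := by
          simp only [goB, if_neg hbig, hget, hP1]
        have hmemo : (goB (k + 1) n memo).2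
            = (goB k n P1.2).2.insert (((k : Int) + 1), n) (P1.1 ++ (goB k n P1.2).1) := by
          simp only [goB, if_neg hbig, hget, hP1]
        have hres : P1.1 ++ (goB k n P1.2).1 = fGo (k + 1) n := by
          rw [h2.1, hP1v, hfgo, List.map_id']
        refine ⟨by rw [hval, hres], ?_⟩
        rw [hmemo]
        intro p r hp
        rw [PySem.Dict.get?_insert] at hp
        by_cases hpk : p = (((k : Int) + 1), n)
        · rw [if_pos hpk] at hp
          injection hp with hp
          subst hpk
          refine ⟨by simp; omega, ?_⟩
          have htn : ((k : Int) + 1).toNat = k + 1 := by omega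
          simp only [htn]
          rw [← hp, hres]
        · rw [if_neg hpk] at hp
          exact h2.2 p r hp
      · -- hit: the stored value is fGo (k+1) n by the memo invariant
        have hstored := hmem _ _ hget
        have htn : ((k : Int) + 1).toNat = k + 1 := by omega
        rw [htn] at hstored
        refine ⟨?_, ?_⟩
        · simp only [goB, if_neg hbig, hget]; exact hstored.2
        · simp only [goB, if_neg hbig, hget]; exact hmem

-- ===== VERDICT (by name: the statement is the Claim_ definition above) =====
theorem f_spec : Claim_equal_f := by
  intro a n _ _
  unfold Spec_f f f_alt
  exact ((goB_correct a.toNat n PySem.Dict.empty memoOK_empty).1).symm
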